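-- pv_equiv track=rewrite | github.com/MasonCheng0312/SummerTraningProject | python_hw3_2023.py | Split_dict_to_tuple
-- ===== SOURCE A (Python) =====
-- def Split_dict_to_tuple(data: list[dict[str, tuple[int, int]]]):  # 將舊的檔案格式更改為較為簡單的tuple形式
--     result = []
--     for _, data_dict in enumerate(sorted(data, key=lambda x: list(x.values())[0][0])):
--         location = list(data_dict.values())
--         startPoint = location[0][0]
--         endPoint = location[0][1]
--         result.append(tuple((startPoint, endPoint)))
--     return result
-- ===== SOURCE B (Python) =====
-- def Split_dict_to_tuple(data: list[dict[str, tuple[int, int]]]):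
--     # Single pass: insert each extracted (start, end) tuple into an already-sorted
--     # accumulator (insertion after equal keys keeps the stable tie order); no sorted().
--     result = []
--     for d in data:
--         s, e = next(iter(d.values()))
--         i = 0
--         while i < len(result) and not (s < result[i][0]):
--             i += 1
--         result.insert(i, (s, e))
--     return result
-- ===== Notes on version B (the rewrite author's own statement) =====
-- stated objective: alternative
-- what changed: B never calls sorted(): it makes one pass over the data, extracting each dict's first (start, end) tuple and inserting it into a sorted accumulator by a linear scan (after equal keys, so tie order matches the stable library sort), instead of sorting the dict list with a key function and then extracting in a second loop.
import Mathlib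
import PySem

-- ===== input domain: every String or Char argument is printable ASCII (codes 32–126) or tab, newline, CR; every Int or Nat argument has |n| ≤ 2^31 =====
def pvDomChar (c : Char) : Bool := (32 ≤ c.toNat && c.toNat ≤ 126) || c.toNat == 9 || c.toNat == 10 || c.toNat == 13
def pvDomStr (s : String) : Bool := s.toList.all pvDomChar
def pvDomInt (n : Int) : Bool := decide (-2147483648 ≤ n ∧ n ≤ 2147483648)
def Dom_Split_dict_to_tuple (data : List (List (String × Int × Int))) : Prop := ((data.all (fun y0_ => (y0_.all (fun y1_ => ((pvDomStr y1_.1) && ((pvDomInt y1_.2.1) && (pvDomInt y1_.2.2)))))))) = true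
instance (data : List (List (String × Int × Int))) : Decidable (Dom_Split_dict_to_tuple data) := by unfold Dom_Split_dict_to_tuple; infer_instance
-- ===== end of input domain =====

-- B replaces A's library sort + extraction loop by one pass that inserts each
-- extracted (start, end) tuple into a sorted accumulator (alternative decomposition).

-- ===== PORT A =====
-- list(d.values())[0]  (default irrelevant: Pre_ requires every dict nonempty)
def pvFirstVal (d : List (String × Int × Int)) : Int × Int :=
  PySem.List.pyGetD (d.map (·.2)) 0 (0, 0)

def Split_dict_to_tuple (data : List (List (String × Int × Int))) : List (Int × Int) :=
  (PySem.List.sorted data (fun x => (pvFirstVal x).1) false).foldl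
    (fun result data_dict => result ++ [((pvFirstVal data_dict).1, (pvFirstVal data_dict).2)]) []

-- ===== PORT B =====
-- next(iter(d.values()))  (default irrelevant: Pre_ requires every dict nonempty)
def pvFirstValB (d : List (String × Int × Int)) : Int × Int :=
  (d.headD ("", 0, 0)).2

-- B's inner while/insert: walk the sorted accumulator and place t before the first
-- element whose key exceeds t's (exactly B's scan; PySem.List.insertBy is that recursion).
def Split_dict_to_tuple_alt (data : List (List (String × Int × Int))) : List (Int × Int) :=
  data.foldl
    (fun result d =>
      PySem.List.insertBy (fun a b => decide (a.1 < b.1)) (pvFirstValB d) result) []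

-- ===== PRECONDITION & SPEC =====
-- Pre_ excludes inputs containing an empty dict: there A raises IndexError
-- (list(d.values())[0]) and B raises StopIteration (next(iter(d.values()))).
def Pre_Split_dict_to_tuple (data : List (List (String × Int × Int))) : Prop :=
  (data.all (fun d => !d.isEmpty)) = true
instance (data : List (List (String × Int × Int))) : Decidable (Pre_Split_dict_to_tuple data) := by
  unfold Pre_Split_dict_to_tuple; infer_instance
def pvWitness_Split_dict_to_tuple : (List (List (String × Int × Int))) := [[("a", 1, 2)], [("b", 0, 5)]]

def Spec_Split_dict_to_tuple (data : List (List (String × Int × Int))) (out : List (Int × Int)) : Prop := out = Split_dict_to_tuple_alt data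
instance (data : List (List (String × Int × Int))) (out : List (Int × Int)) : Decidable (Spec_Split_dict_to_tuple data out) := by unfold Spec_Split_dict_to_tuple; infer_instance

-- ===== CLAIM =====
def Claim_equal_Split_dict_to_tuple : Prop := ∀ (data : List (List (String × Int × Int))), Dom_Split_dict_to_tuple data → Pre_Split_dict_to_tuple data → Spec_Split_dict_to_tuple data (Split_dict_to_tuple data)

-- ===== LEMMAS AND PROOFS =====

theorem firstVal_eq (d : List (String × Int × Int)) : pvFirstVal d = pvFirstValB d := by
  cases d <;> simp [pvFirstVal, pvFirstValB, PySem.List.pyGetD, PySem.List.pyGet?, PySem.List.pyIdx?]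

theorem map_insertBy {α β : Type} (g : α → β) (bef : β → β → Bool) (x : α) (ys : List α) :
    (PySem.List.insertBy (fun a b => bef (g a) (g b)) x ys).map g
      = PySem.List.insertBy bef (g x) (ys.map g) := by
  induction ys with
  | nil => simp [PySem.List.insertBy]
  | cons y ys ih =>
    simp only [PySem.List.insertBy, List.map]
    split <;> simp_all

theorem map_foldl_insertBy {α β : Type} (g : α → β) (bef : β → β → Bool)
    (xs : List α) (acc : List α) :
    (xs.foldl (fun acc x => PySem.List.insertBy (fun a b => bef (g a) (g b)) x acc) acc).map g
      = xs.foldl (fun acc x => PySem.List.insertBy bef (g x) acc) (acc.map g) := by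
  induction xs generalizing acc with
  | nil => rfl
  | cons x xs ih => simp only [List.foldl]; rw [ih, map_insertBy]

-- ===== VERDICT =====
theorem Split_dict_to_tuple_spec : Claim_equal_Split_dict_to_tuple := by
  intro data _ _
  unfold Spec_Split_dict_to_tuple Split_dict_to_tuple Split_dict_to_tuple_alt
  rw [PySem.List.foldl_append_singleton_eq_map, List.nil_append,
      PySem.List.sorted_eq_foldl_insertBy]
  simp only [firstVal_eq]
  exact map_foldl_insertBy pvFirstValB (fun a b => decide (a.1 < b.1)) data []
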